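-- pv_equiv track=rewrite | github.com/muhammadhasan01/cp | Online Judge/Training Gate/Pemrograman Dasar/12 - Faktorial Ganjil Genap.py | ovf
-- ===== SOURCE A (Python) =====
-- def ovf(a):
--     if a == 1 or a == 2:
--         return 1
--     else:
--         if a%2 == 0:
--             return (a//2)*ovf(a-1)
--         else:
--             return a*ovf(a-1)
-- ===== SOURCE B (Python) =====
-- def ovf(a):
--     result = 1
--     for k in range(3, a + 1):
--         result *= k // 2 if k % 2 == 0 else k
--     return result
-- ===== Notes on version B (the rewrite author's own statement) =====
-- stated objective: simpler
-- what changed: Replaces the downward recursion by a single upward range(3, a+1) product loop (no recursion, no call stack).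
-- outside the precondition, e.g. on ovf(0): A raises RecursionError, B returns 1
import Mathlib
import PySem

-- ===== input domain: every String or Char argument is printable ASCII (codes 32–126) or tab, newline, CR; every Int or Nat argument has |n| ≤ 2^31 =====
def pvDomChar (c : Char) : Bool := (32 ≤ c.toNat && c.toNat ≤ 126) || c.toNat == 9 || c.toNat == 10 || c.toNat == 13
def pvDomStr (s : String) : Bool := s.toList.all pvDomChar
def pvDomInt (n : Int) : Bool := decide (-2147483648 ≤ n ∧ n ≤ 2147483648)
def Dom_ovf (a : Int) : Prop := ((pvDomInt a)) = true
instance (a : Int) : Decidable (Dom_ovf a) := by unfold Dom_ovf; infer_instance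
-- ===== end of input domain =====

-- B replaces A's downward recursion by one upward range(3, a+1) product loop (objective: simpler).

-- ===== PORT A =====
-- A's recursion is unbounded for a ≤ 0 (Python raises RecursionError there); the fuel
-- counter only makes the recursion total in Lean — for every a ≥ 1 the fuel a.toNat is
-- never exhausted, so ovf computes exactly A's value on all of Pre_.
def ovfFuel : Nat → Int → Int
  | 0, _ => 0
  | n+1, a =>
    if a = 1 ∨ a = 2 then 1
    else if PySem.Int.mod a 2 = 0 then (PySem.Int.floordiv a 2) * ovfFuel n (a-1)
    else a * ovfFuel n (a-1)

def ovf (a : Int) : Int := ovfFuel a.toNat a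

-- ===== PORT B =====
def ovf_alt (a : Int) : Int :=
  (PySem.List.pyRange 3 (a+1) 1).foldl
    (fun result k => result * (if PySem.Int.mod k 2 = 0 then PySem.Int.floordiv k 2 else k)) 1

-- ===== PRECONDITION & SPEC =====
-- Pre_ excludes exactly a ≤ 0, where A never returns (infinite recursion → RecursionError).
def Pre_ovf (a : Int) : Prop := 1 ≤ a
instance (a : Int) : Decidable (Pre_ovf a) := by unfold Pre_ovf; infer_instance
def pvWitness_ovf : Int := 5

def Spec_ovf (a : Int) (out : Int) : Prop := out = ovf_alt a
instance (a : Int) (out : Int) : Decidable (Spec_ovf a out) := by unfold Spec_ovf; infer_instance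

-- ===== CLAIM (what is proved, stated in full; the proofs are below) =====
def Claim_equal_ovf : Prop := ∀ (a : Int), Dom_ovf a → Pre_ovf a → Spec_ovf a (ovf a)

-- ===== LEMMAS AND PROOFS =====

-- B's product over range(3, a+1) extended by one step at the top.
lemma ovf_alt_step (a : Int) (h : 3 ≤ a) :
    ovf_alt a = ovf_alt (a-1) *
      (if PySem.Int.mod a 2 = 0 then PySem.Int.floordiv a 2 else a) := by
  unfold ovf_alt
  have hb : (3:Int) ≤ a := h
  have : PySem.List.pyRange 3 (a+1) 1 = PySem.List.pyRange 3 a 1 ++ [a] := by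
    have := PySem.List.pyRange_one_succ_right (a := 3) (b := a) hb
    simpa using this
  rw [this, List.foldl_append]
  have : a - 1 + 1 = a := by ring
  rw [this]
  simp

lemma ovf_alt_one : ovf_alt 1 = 1 := by decide
lemma ovf_alt_two : ovf_alt 2 = 1 := by decide

-- Core invariant: with any sufficient fuel, A's recursion equals B's product.
lemma ovfFuel_eq (n : Nat) : ∀ (a : Int), 1 ≤ a → a.toNat ≤ n → ovfFuel n a = ovf_alt a := by
  induction n with
  | zero =>
    intro a h1 hn
    exfalso; omega
  | succ n ih =>
    intro a h1 hn
    by_cases h12 : a = 1 ∨ a = 2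
    · rcases h12 with h | h <;> subst h
      · simp [ovfFuel, ovf_alt_one]
      · simp [ovfFuel, ovf_alt_two]
    · have h3 : 3 ≤ a := by omega
      have hrec : ovfFuel n (a-1) = ovf_alt (a-1) := by
        apply ih (a-1) (by omega) (by omega)
      rw [ovf_alt_step a h3, ← hrec]
      simp [ovfFuel, h12, mul_comm]

-- ===== VERDICT (by name: the statement is the Claim_ definition above) =====
theorem ovf_spec : Claim_equal_ovf := by
  intro a _ hpre
  unfold Spec_ovf ovf
  exact ovfFuel_eq a.toNat a hpre (le_refl _)
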